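-- pv_equiv track=rewrite | github.com/marcepanowyy/AlgorithmsDataStructures | practice/year_2019/colloquium_retake/term_3/ex_3.py | Longestincomplete
-- ===== SOURCE A (Python) =====
-- def Longestincomplete(A, k):
--     n = len(A)
--     max = 0
--     C = []
--
--     for i in range(n):
--         if A[i] not in C:
--             C += [A[i]]
--
--     for num in range(k):
--         c = 0
--         for i in range(n):
--             if A[i] == C[num]:
--                 c = 0
--             else:
--                 c += 1
--
--             if c > max:
--                 max = c
--
--     return max
-- ===== SOURCE B (Python) =====
-- def Longestincomplete(A, k):
--     n = len(A)
--     order = []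
--     last = {}
--     gap = {}
--     for i, x in enumerate(A):
--         if x not in last:
--             order.append(x)
--             gap[x] = i
--         else:
--             g = i - last[x] - 1
--             if g > gap[x]:
--                 gap[x] = g
--         last[x] = i
--     best = 0
--     for x in order[:max(k, 0)]:
--         g = gap[x]
--         tail = n - last[x] - 1
--         if tail > g:
--             g = tail
--         if g > best:
--             best = g
--     return best
-- ===== Notes on version B (the rewrite author's own statement) =====
-- stated objective: faster
-- what changed: A rescans the whole array once per each of the first k distinct values; B makes a single pass recording, per value, its last occurrence and largest gap between occurrences, then maxes over the first k distinct values.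
import Mathlib
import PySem

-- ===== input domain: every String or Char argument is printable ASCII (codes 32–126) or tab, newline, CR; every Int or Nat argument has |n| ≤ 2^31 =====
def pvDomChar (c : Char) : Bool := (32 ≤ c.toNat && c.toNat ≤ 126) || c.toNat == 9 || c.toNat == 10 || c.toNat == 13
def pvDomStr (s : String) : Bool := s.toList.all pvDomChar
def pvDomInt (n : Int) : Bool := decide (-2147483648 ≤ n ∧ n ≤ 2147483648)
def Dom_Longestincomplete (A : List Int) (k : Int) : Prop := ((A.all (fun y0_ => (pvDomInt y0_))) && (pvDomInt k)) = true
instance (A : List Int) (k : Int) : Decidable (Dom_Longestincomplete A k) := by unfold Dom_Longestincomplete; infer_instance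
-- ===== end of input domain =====

-- B replaces A's k rescans of the whole array (one scan per distinct value) by a single pass
-- recording, per value, its last occurrence and its largest gap between occurrences.

-- ===== PORT A =====
-- A-side helpers: the two loop bodies and the distinct-collection loop (Python's C)
def dstep (C : List Int) (x : Int) : List Int := if x ∈ C then C else C ++ [x]

def istep (v : Int) (s : Int × Int) (x : Int) : Int × Int :=
  let c : Int := if x = v then 0 else s.1 + 1
  (c, if c > s.2 then c else s.2)

def aDistinct (A : List Int) : List Int :=
  (PySem.List.pyRange 0 (PySem.List.len A) 1).foldl (fun C i => dstep C (PySem.List.pyGetD A i 0)) []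

def Longestincomplete (A : List Int) (k : Int) : Int :=
  (PySem.List.pyRange 0 k 1).foldl
    (fun m num =>
      ((PySem.List.pyRange 0 (PySem.List.len A) 1).foldl
        (fun s i => istep (PySem.List.pyGetD (aDistinct A) num 0) s (PySem.List.pyGetD A i 0))
        (0, m)).2)
    0

-- ===== PORT B =====
-- B-side helpers: the body of B's single pass (state: order, last, gap) and of its final max loop
def bstep (st : List Int × PySem.Dict Int Int × PySem.Dict Int Int) (p : Int × Int) :
    List Int × PySem.Dict Int Int × PySem.Dict Int Int :=
  if (st.2.1).contains p.2 = false then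
    (st.1 ++ [p.2], st.2.1.insert p.2 p.1, st.2.2.insert p.2 p.1)
  else
    let g : Int := p.1 - st.2.1.getD p.2 0 - 1
    (st.1, st.2.1.insert p.2 p.1,
      if g > st.2.2.getD p.2 0 then st.2.2.insert p.2 g else st.2.2)

def bScan (A : List Int) : List Int × PySem.Dict Int Int × PySem.Dict Int Int :=
  (PySem.List.enumerate A 0).foldl bstep ([], PySem.Dict.empty, PySem.Dict.empty)

def bestStep (n : Int) (last gap : PySem.Dict Int Int) (b : Int) (x : Int) : Int :=
  let g : Int := gap.getD x 0
  let tail : Int := n - last.getD x 0 - 1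
  let g' : Int := if tail > g then tail else g
  if g' > b then g' else b

def Longestincomplete_alt (A : List Int) (k : Int) : Int :=
  (PySem.List.slice (bScan A).1 none (some (max k 0))).foldl
    (bestStep (PySem.List.len A) (bScan A).2.1 (bScan A).2.2) 0

-- ===== PRECONDITION & SPEC =====
-- Pre_ excludes only nonempty A with k larger than the number of distinct values of A, where A raises IndexError (at C[num]).
def Pre_Longestincomplete (A : List Int) (k : Int) : Prop :=
  A = [] ∨ k ≤ ((PySem.List.dedup A).length : Int)
instance (A : List Int) (k : Int) : Decidable (Pre_Longestincomplete A k) := by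
  unfold Pre_Longestincomplete; infer_instance

def pvWitness_Longestincomplete : List Int × Int := ([1, 2, 1, 3], 2)

def Spec_Longestincomplete (A : List Int) (k : Int) (out : Int) : Prop := out = Longestincomplete_alt A k
instance (A : List Int) (k : Int) (out : Int) : Decidable (Spec_Longestincomplete A k out) := by
  unfold Spec_Longestincomplete; infer_instance

-- ===== CLAIM (what is proved, stated in full; the proofs are below) =====
def Claim_equal_Longestincomplete : Prop := ∀ (A : List Int) (k : Int), Dom_Longestincomplete A k → Pre_Longestincomplete A k → Spec_Longestincomplete A k (Longestincomplete A k)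


-- ===== LEMMAS AND PROOFS =====

-- per-value pure state: (index of last occurrence of v, largest gap seen so far), none before the first occurrence
def pvStep (v : Int) (st : Option (Int × Int)) (p : Int × Int) : Option (Int × Int) :=
  if p.2 = v then
    some (p.1, match st with
      | none => p.1
      | some (l, g) => if p.1 - l - 1 > g then p.1 - l - 1 else g)
  else st

def pvL (st : Option (Int × Int)) : Int := match st with | none => -1 | some (l, _) => l
def pvG (st : Option (Int × Int)) : Int := match st with | none => 0 | some (_, g) => g

def pvO (A : List Int) (v : Int) : Option (Int × Int) :=
  (PySem.List.enumerate A 0).foldl (pvStep v) none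

-- the longest run of A avoiding v, expressed through the per-value state
def pvM (A : List Int) (v : Int) : Int :=
  max (pvG (pvO A v)) ((A.length : Int) - 1 - pvL (pvO A v))

-- A's inner scan computed from the per-value state
lemma inner_inv (v : Int) (xs : List Int) : ∀ (t c m m0 : Int) (st : Option (Int × Int)),
    0 ≤ m0 → 0 ≤ c → 0 ≤ pvG st → c = t - 1 - pvL st → m = max m0 (max (pvG st) c) →
    (xs.foldl (istep v) (c, m)).2
      = max m0 (max (pvG ((PySem.List.enumerate xs t).foldl (pvStep v) st))
                    (t + (xs.length : Int) - 1 - pvL ((PySem.List.enumerate xs t).foldl (pvStep v) st))) := by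
  induction xs with
  | nil =>
    intro t c m m0 st hm0 hc hg hct hm
    simp only [List.foldl_nil, PySem.List.enumerate_nil, List.length_nil, Int.natCast_zero]
    omega
  | cons x xs ih =>
    intro t c m m0 st hm0 hc hg hct hm
    simp only [List.foldl_cons, PySem.List.enumerate_cons, List.length_cons]
    rcases st with _ | ⟨l, g⟩ <;> by_cases hxv : x = v <;>
      simp only [pvG, pvL] at hm hct hg
    · -- st none, x = v
      have h1 : istep v (c, m) x = (0, m) := by
        simp only [istep, if_pos hxv, Prod.mk.injEq]
        refine ⟨trivial, by split_ifs <;> omega⟩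
      have h2 : pvStep v none (t, x) = some (t, t) := by simp [pvStep, hxv]
      rw [h1, h2, ih (t+1) 0 m m0 (some (t, t)) hm0 le_rfl (by simp [pvG]; omega)
        (by simp [pvL]) (by simp only [pvG]; omega)]
      push_cast; ring_nf
    · -- st none, x ≠ v
      have h1 : istep v (c, m) x = (c + 1, max m (c+1)) := by
        simp only [istep, if_neg hxv, Prod.mk.injEq]
        refine ⟨trivial, by split_ifs <;> omega⟩
      have h2 : pvStep v none (t, x) = none := by simp [pvStep, hxv]
      rw [h1, h2, ih (t+1) (c+1) (max m (c+1)) m0 none hm0 (by omega) hg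
        (by simp only [pvL]; omega) (by simp only [pvG]; omega)]
      push_cast; ring_nf
    · -- st some, x = v
      have h1 : istep v (c, m) x = (0, m) := by
        simp only [istep, if_pos hxv, Prod.mk.injEq]
        refine ⟨trivial, by split_ifs <;> omega⟩
      rw [h1]
      have h2 : pvStep v (some (l, g)) (t, x) = some (t, if t - l - 1 > g then t - l - 1 else g) := by
        simp [pvStep, hxv]
      rw [h2, ih (t+1) 0 m m0 (some (t, if t - l - 1 > g then t - l - 1 else g)) hm0 le_rfl
        (by simp only [pvG]; split_ifs <;> omega)
        (by simp [pvL]) (by simp only [pvG]; split_ifs <;> omega)]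
      push_cast; ring_nf
    · -- st some, x ≠ v
      have h1 : istep v (c, m) x = (c + 1, max m (c+1)) := by
        simp only [istep, if_neg hxv, Prod.mk.injEq]
        refine ⟨trivial, by split_ifs <;> omega⟩
      have h2 : pvStep v (some (l, g)) (t, x) = some (l, g) := by simp [pvStep, hxv]
      rw [h1, h2, ih (t+1) (c+1) (max m (c+1)) m0 (some (l, g)) hm0 (by omega) hg
        (by simp only [pvL]; omega) (by simp only [pvG]; omega)]
      push_cast; ring_nf

-- B's dicts projected at one key follow the per-value state
lemma proj_lemma (v : Int) (xs : List (Int × Int)) :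
    ∀ (st : List Int × PySem.Dict Int Int × PySem.Dict Int Int) (o : Option (Int × Int)),
    st.2.1.get? v = o.map Prod.fst → st.2.2.get? v = o.map Prod.snd →
    ((xs.foldl bstep st).2.1.get? v = (xs.foldl (pvStep v) o).map Prod.fst ∧
     (xs.foldl bstep st).2.2.get? v = (xs.foldl (pvStep v) o).map Prod.snd) := by
  induction xs with
  | nil => intro st o h1 h2; exact ⟨h1, h2⟩
  | cons p xs ih =>
    intro st o h1 h2
    simp only [List.foldl_cons]
    by_cases hxv : p.2 = v
    · -- the element is v: the branch taken is decided by o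
      rcases o with _ | ⟨l, g⟩
      · have hc : st.2.1.contains p.2 = false := by
          rw [PySem.Dict.contains_eq_isSome_get?, hxv, h1]; rfl
        have hb : bstep st p = (st.1 ++ [p.2], st.2.1.insert p.2 p.1, st.2.2.insert p.2 p.1) := by
          simp [bstep, hc]
        have hp : pvStep v none p = some (p.1, p.1) := by simp [pvStep, hxv]
        rw [hb, hp]
        exact ih _ _ (by simp [hxv, PySem.Dict.get?_insert_self])
          (by simp [hxv, PySem.Dict.get?_insert_self])
      · have hc : st.2.1.contains p.2 = true := by
          rw [PySem.Dict.contains_eq_isSome_get?, hxv, h1]; rfl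
        have hgd : st.2.1.getD p.2 0 = l := by
          rw [PySem.Dict.getD_eq_get?_getD, hxv, h1]; rfl
        have hgd2 : st.2.2.getD p.2 0 = g := by
          rw [PySem.Dict.getD_eq_get?_getD, hxv, h2]; rfl
        have hb : bstep st p = (st.1, st.2.1.insert p.2 p.1,
            if p.1 - l - 1 > g then st.2.2.insert p.2 (p.1 - l - 1) else st.2.2) := by
          simp [bstep, hc, hgd, hgd2]
        have hp : pvStep v (some (l, g)) p
            = some (p.1, if p.1 - l - 1 > g then p.1 - l - 1 else g) := by
          simp [pvStep, hxv]
        rw [hb, hp]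
        refine ih _ _ (by simp [hxv, PySem.Dict.get?_insert_self]) ?_
        by_cases hgt : p.1 - l - 1 > g
        · simp [hgt, hxv, PySem.Dict.get?_insert_self]
        · simp [hgt, h2]
    · -- another element: every update is at key p.2 ≠ v, lookups at v are unchanged
      have hp : pvStep v o p = o := by simp [pvStep, hxv]
      rw [hp]
      have hne : v ≠ p.2 := fun h => hxv h.symm
      refine ih _ _ ?_ ?_ <;> unfold bstep <;> dsimp only <;> split_ifs <;>
        simp [PySem.Dict.get?_insert, hne, h1, h2]

-- B's order component is A's dedup loop, and the keys of `last` are exactly its members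
lemma order_lemma (xs : List (Int × Int)) :
    ∀ (st : List Int × PySem.Dict Int Int × PySem.Dict Int Int),
    (∀ y, st.2.1.contains y = decide (y ∈ st.1)) →
    ((xs.foldl bstep st).1 = (xs.map Prod.snd).foldl dstep st.1 ∧
     ∀ y, (xs.foldl bstep st).2.1.contains y = decide (y ∈ (xs.foldl bstep st).1)) := by
  induction xs with
  | nil => intro st h; exact ⟨rfl, h⟩
  | cons p xs ih =>
    intro st h
    simp only [List.foldl_cons, List.map_cons]
    by_cases hm : p.2 ∈ st.1
    · have hc : st.2.1.contains p.2 = true := by rw [h]; simp [hm]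
      have hb : (bstep st p).1 = st.1 := by simp [bstep, hc]
      have hd : dstep st.1 p.2 = st.1 := by simp [dstep, hm]
      rw [hd]
      have hcont : ∀ y, (bstep st p).2.1.contains y = decide (y ∈ (bstep st p).1) := by
        intro y
        have : (bstep st p).2.1 = st.2.1.insert p.2 p.1 := by simp [bstep, hc]
        rw [this, hb, PySem.Dict.contains_insert, h]
        by_cases hy : y = p.2 <;> simp [hy, hm]
      have := ih (bstep st p) hcont
      rw [hb] at this; exact this
    · have hc : st.2.1.contains p.2 = false := by rw [h]; simp [hm]
      have hb : (bstep st p).1 = st.1 ++ [p.2] := by simp [bstep, hc]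
      have hd : dstep st.1 p.2 = st.1 ++ [p.2] := by simp [dstep, hm]
      rw [hd]
      have hcont : ∀ y, (bstep st p).2.1.contains y = decide (y ∈ (bstep st p).1) := by
        intro y
        have : (bstep st p).2.1 = st.2.1.insert p.2 p.1 := by simp [bstep, hc]
        rw [this, hb, PySem.Dict.contains_insert, h]
        by_cases hy : y = p.2 <;> simp [hy]
      have := ih (bstep st p) hcont
      rw [hb] at this; exact this

-- PySem's dedup is A's dedup loop
lemma dedup_eq_foldl_dstep (xs : List Int) : PySem.List.dedup xs = xs.foldl dstep [] := by
  rw [PySem.List.dedup_eq_ofList]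
  unfold PySem.Set.ofList
  exact PySem.List.foldl_congr_mem _ _ _ _
    (fun acc x _ => by simp [PySem.Set.add, dstep])

-- A's dedup loop over indices is the fold over the list
lemma aDistinct_eq (A : List Int) : aDistinct A = A.foldl dstep [] := by
  unfold aDistinct
  rw [PySem.List.len_eq]
  exact PySem.List.foldl_pyRange_zero_pyGetD' A 0 dstep []

-- A's whole inner scan equals max of the incoming maximum and pvM
lemma innerA_eq (A : List Int) (v m : Int) (hm : 0 ≤ m) :
    ((PySem.List.pyRange 0 (PySem.List.len A) 1).foldl
      (fun s i => istep v s (PySem.List.pyGetD A i 0)) (0, m)).2 = max m (pvM A v) := by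
  rw [PySem.List.len_eq, PySem.List.foldl_pyRange_zero_pyGetD' A 0 (istep v) (0, m)]
  have := inner_inv v A 0 0 m m none hm le_rfl (by simp [pvG]) (by simp [pvL]) (by simp [pvG]; omega)
  rw [this]
  unfold pvM pvO
  omega

-- monotonicity of the max-fold
lemma foldl_max_ge (f : Int → Int) (vs : List Int) : ∀ b : Int, b ≤ vs.foldl (fun m v => max m (f v)) b := by
  induction vs with
  | nil => intro b; simp
  | cons v vs ih => intro b; exact le_trans (le_max_left b (f v)) (ih (max b (f v)))

-- A's outer loop over indices 0..kn-1 is the max-fold over the first kn distinct values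
lemma outer_eq (A : List Int) : ∀ (kn : Nat), kn ≤ (aDistinct A).length → ∀ b : Int, 0 ≤ b →
    (PySem.List.pyRange 0 (kn : Int) 1).foldl
      (fun m num =>
        ((PySem.List.pyRange 0 (PySem.List.len A) 1).foldl
          (fun s i => istep (PySem.List.pyGetD (aDistinct A) num 0) s (PySem.List.pyGetD A i 0))
          (0, m)).2) b
    = ((aDistinct A).take kn).foldl (fun m v => max m (pvM A v)) b := by
  intro kn
  induction kn with
  | zero => intro _ b _; simp [PySem.List.pyRange_one_eq_nil]
  | succ kn ih =>
    intro hk b hb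
    have hk' : kn ≤ (aDistinct A).length := by omega
    have hlt : kn < (aDistinct A).length := by omega
    have hr : PySem.List.pyRange 0 ((kn + 1 : Nat) : Int) 1
        = PySem.List.pyRange 0 (kn : Int) 1 ++ [(kn : Int)] := by
      push_cast
      exact PySem.List.pyRange_one_succ_right (by positivity)
    rw [hr, List.foldl_append, ih hk' b hb, List.take_add_one, List.foldl_append]
    have hget : (aDistinct A)[kn]? = some ((aDistinct A)[kn]) := List.getElem?_eq_getElem hlt
    rw [hget]
    simp only [Option.toList_some, List.foldl_cons, List.foldl_nil]
    rw [PySem.List.pyGetD_natCast]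
    rw [innerA_eq A _ _ (le_trans hb (foldl_max_ge (pvM A) _ b))]
    simp [hlt]

-- pointwise: B's final loop body equals the max with pvM, for members of order
lemma bestStep_eq (A : List Int) (v b : Int) (hv : (pvO A v).isSome) :
    bestStep (PySem.List.len A) (bScan A).2.1 (bScan A).2.2 b v = max b (pvM A v) := by
  obtain ⟨⟨l, g⟩, ho⟩ := Option.isSome_iff_exists.mp hv
  have hproj := proj_lemma v (PySem.List.enumerate A 0) ([], PySem.Dict.empty, PySem.Dict.empty)
    none (by simp) (by simp)
  have h1 : (bScan A).2.1.getD v 0 = l := by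
    unfold bScan; rw [PySem.Dict.getD_eq_get?_getD, hproj.1]
    unfold pvO at ho; rw [ho]; rfl
  have h2 : (bScan A).2.2.getD v 0 = g := by
    unfold bScan; rw [PySem.Dict.getD_eq_get?_getD, hproj.2]
    unfold pvO at ho; rw [ho]; rfl
  unfold bestStep pvM
  rw [h1, h2, PySem.List.len_eq, ho]
  simp only [pvG, pvL]
  split_ifs <;> omega

-- on the empty list both programs are the constant 0, for every k
lemma empty_case (k : Int) : Longestincomplete [] k = Longestincomplete_alt [] k := by
  unfold Longestincomplete Longestincomplete_alt aDistinct bScan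
  simp only [PySem.List.len_eq, List.length_nil, Int.natCast_zero,
    PySem.List.pyRange_one_eq_nil le_rfl, PySem.List.enumerate_nil,
    List.foldl_nil]
  rw [List.foldl_fixed' (fun b => rfl)]
  simp [PySem.List.slice]

-- ===== VERDICT (by name: the statement is the Claim_ definition above) =====
theorem Longestincomplete_spec : Claim_equal_Longestincomplete := by
  unfold Claim_equal_Longestincomplete
  intro A k _ hpre
  by_cases hA : A = []
  · subst hA; exact empty_case k
  unfold Spec_Longestincomplete Longestincomplete Longestincomplete_alt
  have horder := order_lemma (PySem.List.enumerate A 0) ([], PySem.Dict.empty, PySem.Dict.empty)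
    (by intro y; simp)
  have hord1 : (bScan A).1 = aDistinct A := by
    unfold bScan
    rw [horder.1, PySem.List.map_snd_enumerate, aDistinct_eq]
  have hpre' : k ≤ ((aDistinct A).length : Int) := by
    rw [Pre_Longestincomplete, dedup_eq_foldl_dstep, ← aDistinct_eq] at hpre
    exact hpre.resolve_left hA
  by_cases hk : k ≤ 0
  · rw [PySem.List.pyRange_one_eq_nil hk]
    have : max k 0 = ((0 : Nat) : Int) := by simp; omega
    rw [this, PySem.List.slice_to_natCast]
    simp
  · rw [not_le] at hk
    have hkn : k = ((k.toNat : Nat) : Int) := by omega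
    have hmax : max k 0 = ((k.toNat : Nat) : Int) := by omega
    have hkle : k.toNat ≤ (aDistinct A).length := by omega
    rw [hmax, PySem.List.slice_to_natCast, hord1]
    rw [hkn, outer_eq A k.toNat hkle 0 le_rfl]
    refine (PySem.List.foldl_congr_mem _ _ _ _ ?_).symm
    intro b v hv
    have hvC : v ∈ aDistinct A := List.mem_of_mem_take hv
    have hproj := proj_lemma v (PySem.List.enumerate A 0)
      ([], PySem.Dict.empty, PySem.Dict.empty) none (by simp) (by simp)
    have hcv : (bScan A).2.1.contains v = true := by
      rw [show (bScan A).2.1.contains v = decide (v ∈ (bScan A).1) from horder.2 v, hord1]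
      simp [hvC]
    have hget : (bScan A).2.1.get? v = (pvO A v).map Prod.fst := hproj.1
    have hOsome : (pvO A v).isSome := by
      rw [PySem.Dict.contains_eq_isSome_get?, hget] at hcv
      simpa using hcv
    exact bestStep_eq A v b hOsome
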